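-- pv_equiv track=rewrite | github.com/12novel30/codingTest | forReal/elice_babo_221106/ex5.py | solution
-- ===== SOURCE A (Python) =====
-- def solution(kyul):
--     count = 0
--     for i in range(len(kyul)-1):
--         for j in range(i+1, len(kyul)):
--             if kyul[i] < kyul[j]:
--                 break
--             else:
--                 count += 1
--     return count
-- ===== SOURCE B (Python) =====
-- def solution(kyul):
--     # Right-to-left pass: r[i] = length of the run of elements <= kyul[i] just
--     # after i, computed by jumping over already-computed runs (amortised fast).
--     n = len(kyul)
--     r = [0] * n
--     total = 0
--     for i in range(n - 1, -1, -1):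
--         j = i + 1
--         while j < n and kyul[j] <= kyul[i]:
--             j = j + r[j] + 1
--         r[i] = j - i - 1
--         total += r[i]
--     return total
-- ===== Notes on version B (the rewrite author's own statement) =====
-- stated objective: faster
-- what changed: Replaces A's nested rescan (for each i, scan forward until a strictly greater element) by a single right-to-left pass that memoises each index's run length and jumps over already-computed runs, so each while-step skips a whole run.
import Mathlib
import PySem

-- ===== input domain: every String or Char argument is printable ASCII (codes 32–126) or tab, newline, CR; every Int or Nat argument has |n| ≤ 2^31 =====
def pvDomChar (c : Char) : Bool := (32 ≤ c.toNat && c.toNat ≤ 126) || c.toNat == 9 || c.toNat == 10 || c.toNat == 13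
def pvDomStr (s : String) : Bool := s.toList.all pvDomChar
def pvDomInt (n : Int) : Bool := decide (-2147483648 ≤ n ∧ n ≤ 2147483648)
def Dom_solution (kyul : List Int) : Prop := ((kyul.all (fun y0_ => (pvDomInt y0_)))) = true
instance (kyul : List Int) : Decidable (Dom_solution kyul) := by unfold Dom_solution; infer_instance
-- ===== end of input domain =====

-- B replaces A's quadratic rescans by one right-to-left pass that jumps over
-- already-computed runs; equivalence of the two is proved below (objective: faster).

-- ===== PORT A =====
-- inner 'for j in range(i+1, len(kyul))' with break; indices are always in range,
-- so kyul[i]/kyul[j] are ported exactly by pyGetD.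
def solInner (a : List Int) (i : Int) (js : List Int) (count : Int) : Int :=
  match js with
  | [] => count
  | j :: rest =>
      if PySem.List.pyGetD a i 0 < PySem.List.pyGetD a j 0 then count
      else solInner a i rest (count + 1)

def solution (kyul : List Int) : Int :=
  (PySem.List.pyRange 0 ((kyul.length : Int) - 1) 1).foldl
    (fun count i =>
      solInner kyul i (PySem.List.pyRange (i + 1) (kyul.length : Int) 1) count) 0

-- ===== PORT B =====
-- the 'while j < n and kyul[j] <= kyul[i]: j = j + r[j] + 1' loop of Source B
def walkB (a : List Int) (x : Int) (r : List Nat) (n j : Nat) : Nat :=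
  if h : j < n ∧ a.getD j 0 ≤ x then walkB a x r n (j + r.getD j 0 + 1) else j
termination_by n - j
decreasing_by omega

-- the 'for i in range(n-1, -1, -1)' loop of Source B: loopB a n k is the state
-- (r, total) after processing indices i = n-1 down to n-k.
def loopB (a : List Int) (n : Nat) : Nat → (List Nat × Int)
  | 0 => (List.replicate n 0, 0)
  | k + 1 =>
      let s := loopB a n k
      let i := n - (k + 1)
      let j := walkB a (a.getD i 0) s.1 n (i + 1)
      let ri := j - i - 1
      (s.1.set i ri, s.2 + (ri : Int))

def solution_alt (kyul : List Int) : Int := (loopB kyul kyul.length kyul.length).2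

-- ===== PRECONDITION & SPEC =====
def Spec_solution (kyul : List Int) (out : Int) : Prop := out = solution_alt kyul
instance (kyul : List Int) (out : Int) : Decidable (Spec_solution kyul out) := by unfold Spec_solution; infer_instance

-- ===== CLAIM (what is proved, stated in full; the proofs are below) =====
def Claim_equal_solution : Prop := ∀ (kyul : List Int), Dom_solution kyul → Spec_solution kyul (solution kyul)

-- ===== LEMMAS AND PROOFS =====

-- run length after index i: number of consecutive elements ≤ a[i] just after i
def runLen (a : List Int) (i : Nat) : Nat :=
  ((a.drop (i + 1)).takeWhile (fun y => decide (y ≤ a.getD i 0))).length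

theorem takeWhile_split {α : Type} (p q : α → Bool) (l : List α)
    (h : ∀ y ∈ l.takeWhile p, q y = true) :
    l.takeWhile q = l.takeWhile p ++ (l.drop (l.takeWhile p).length).takeWhile q := by
  induction l with
  | nil => rfl
  | cons x t ih =>
    by_cases hp : p x = true
    · have hq : q x = true := h x (by simp [List.takeWhile, hp])
      have ht : ∀ y ∈ t.takeWhile p, q y = true := fun y hy => h y (by simp [List.takeWhile, hp, hy])
      simp [List.takeWhile, hp, hq, ih ht]
    · simp [List.takeWhile, hp]

theorem walkB_eq_aux (a : List Int) (x : Int) (r : List Nat) (f : Nat) :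
    ∀ j, a.length - j ≤ f →
    (∀ m, j ≤ m → m < a.length → r.getD m 0 = runLen a m) →
    walkB a x r a.length j
      = j + ((a.drop j).takeWhile (fun y => decide (y ≤ x))).length := by
  induction f with
  | zero =>
    intro j hf _
    have hj : a.length ≤ j := by omega
    rw [walkB]
    rw [dif_neg (by omega)]
    simp [List.drop_eq_nil_of_le hj]
  | succ f ih =>
    intro j hf hr
    rw [walkB]
    by_cases h : j < a.length ∧ a.getD j 0 ≤ x
    · rw [dif_pos h]
      obtain ⟨hjl, hx⟩ := h
      have hget : a.getD j 0 = a[j] := List.getD_eq_getElem a 0 hjl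
      rw [hget] at hx
      have hdrop : a.drop j = a[j] :: a.drop (j + 1) := List.drop_eq_getElem_cons hjl
      have hrj : r.getD j 0 = runLen a j := hr j le_rfl hjl
      have hsplit := takeWhile_split (fun y => decide (y ≤ a[j])) (fun y => decide (y ≤ x))
        (a.drop (j + 1)) (by
          intro y hy
          have := List.mem_takeWhile_imp hy
          simp only [decide_eq_true_eq] at this ⊢
          exact le_trans this hx)
      have hlen : ((a.drop (j + 1)).takeWhile (fun y => decide (y ≤ a[j]))).length = runLen a j := by
        unfold runLen; rw [hget]
      rw [List.drop_drop] at hsplit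
      have e : j + 1 + ((a.drop (j + 1)).takeWhile (fun y => decide (y ≤ a[j]))).length
          = j + runLen a j + 1 := by omega
      rw [e] at hsplit
      have hih := ih (j + r.getD j 0 + 1) (by omega) (fun m hm hml => hr m (by omega) hml)
      rw [hih, hrj, hdrop]
      rw [List.takeWhile_cons_of_pos (by simp [hx])]
      rw [List.length_cons, hsplit, List.length_append, hlen]
      omega
    · rw [dif_neg h]
      rcases Nat.lt_or_ge j a.length with hjl | hjl
      · have hx : ¬ a.getD j 0 ≤ x := fun hc => h ⟨hjl, hc⟩
        have hget : a.getD j 0 = a[j] := List.getD_eq_getElem a 0 hjl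
        rw [hget] at hx
        rw [List.drop_eq_getElem_cons hjl]
        rw [List.takeWhile_cons_of_neg (by simp [hx])]
        simp
      · simp [List.drop_eq_nil_of_le hjl]

theorem walkB_eq (a : List Int) (x : Int) (r : List Nat) (j : Nat)
    (hr : ∀ m, j ≤ m → m < a.length → r.getD m 0 = runLen a m) :
    walkB a x r a.length j
      = j + ((a.drop j).takeWhile (fun y => decide (y ≤ x))).length :=
  walkB_eq_aux a x r (a.length - j) j le_rfl hr

theorem loopB_invariant (a : List Int) (k : Nat) (hk : k ≤ a.length) :
    (loopB a a.length k).1.length = a.length ∧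
    (∀ m, a.length - k ≤ m → m < a.length → (loopB a a.length k).1.getD m 0 = runLen a m) ∧
    (loopB a a.length k).2
      = (((List.range' (a.length - k) k).map (runLen a)).sum : Int) := by
  induction k with
  | zero =>
    refine ⟨by simp [loopB], ?_, by simp [loopB]⟩
    intro m hm hml; omega
  | succ k ih =>
    obtain ⟨hlen, hr, hsum⟩ := ih (by omega)
    set i := a.length - (k + 1) with hi
    have hik : a.length - k = i + 1 := by omega
    have hil : i < a.length := by omega
    have hwalk := walkB_eq a (a.getD i 0) (loopB a a.length k).1 (i + 1)
      (fun m hm hml => hr m (by omega) hml)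
    have hri : walkB a (a.getD i 0) (loopB a a.length k).1 a.length (i + 1) - i - 1
        = runLen a i := by
      rw [hwalk]; unfold runLen; omega
    refine ⟨?_, ?_, ?_⟩
    · simp [loopB, hlen]
    · intro m hm hml
      simp only [loopB]
      rw [List.getD_eq_getElem?_getD, List.getElem?_set]
      rcases eq_or_ne i m with rfl | hne
      · rw [if_pos rfl, if_pos (by rw [hlen]; exact hil)]
        simpa using hri
      · rw [if_neg hne, ← List.getD_eq_getElem?_getD]
        exact hr m (by omega) hml
    · simp only [loopB]
      rw [hri, hsum, hik, List.range'_succ, List.map_cons, List.sum_cons]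
      push_cast
      ring

theorem solInner_aux (a : List Int) (i : Nat) (hilen : i < a.length) (f : Nat) :
    ∀ (j : Nat) (c : Int), a.length - j ≤ f →
    solInner a (i : Int) (PySem.List.pyRange (j : Int) (a.length : Int) 1) c
      = c + (((a.drop j).takeWhile (fun y => decide (y ≤ a.getD i 0))).length : Int) := by
  induction f with
  | zero =>
    intro j c hf
    have hj : a.length ≤ j := by omega
    rw [PySem.List.pyRange_one_eq_nil (by exact_mod_cast hj)]
    simp [solInner, List.drop_eq_nil_of_le hj]
  | succ f ih =>
    intro j c hf
    rcases Nat.lt_or_ge j a.length with hjl | hjl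
    · rw [PySem.List.pyRange_one_cons (by exact_mod_cast hjl)]
      have hgi : PySem.List.pyGetD a (i : Int) 0 = a.getD i 0 := by
        simp [PySem.List.pyGetD_natCast]
      have hgj : PySem.List.pyGetD a (j : Int) 0 = a.getD j 0 := by
        simp [PySem.List.pyGetD_natCast]
      have hgetj : a.getD j 0 = a[j] := List.getD_eq_getElem a 0 hjl
      rw [List.drop_eq_getElem_cons hjl]
      by_cases hlt : a.getD i 0 < a.getD j 0
      · simp only [solInner]
        rw [hgi, hgj, if_pos hlt]
        rw [List.takeWhile_cons_of_neg (by
          rw [decide_eq_true_eq, not_le, ← hgetj]; exact hlt)]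
        simp
      · have hle : a[j] ≤ a.getD i 0 := by rw [← hgetj]; omega
        simp only [solInner]
        rw [hgi, hgj, if_neg hlt]
        have hcast : ((j : Int) + 1) = ((j + 1 : Nat) : Int) := by push_cast; ring
        rw [hcast, ih (j + 1) (c + 1) (by omega)]
        rw [List.takeWhile_cons_of_pos (by simp only [decide_eq_true_eq]; exact hle)]
        rw [List.length_cons]
        push_cast
        ring
    · rw [PySem.List.pyRange_one_eq_nil (by exact_mod_cast hjl)]
      simp [solInner, List.drop_eq_nil_of_le hjl]

theorem solution_foldA (a : List Int) (m : Nat) (hm : m ≤ a.length) (c : Int) :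
    (PySem.List.pyRange 0 (m : Int) 1).foldl
      (fun count i =>
        solInner a i (PySem.List.pyRange (i + 1) (a.length : Int) 1) count) c
      = c + (((List.range m).map (runLen a)).sum : Int) := by
  induction m generalizing c with
  | zero => simp [PySem.List.pyRange_one_eq_nil]
  | succ m ih =>
    rw [show ((m + 1 : Nat) : Int) = (m : Int) + 1 by push_cast; ring]
    rw [PySem.List.pyRange_one_succ_right (by positivity)]
    rw [List.foldl_append, ih (by omega) c]
    simp only [List.foldl_cons, List.foldl_nil]
    rw [show ((m : Int) + 1) = ((m + 1 : Nat) : Int) by push_cast; ring]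
    rw [solInner_aux a m (by omega) (a.length - (m + 1)) (m + 1) _ le_rfl]
    rw [List.range_succ, List.map_append, List.sum_append]
    simp [runLen]
    ring

theorem solution_eq (a : List Int) :
    solution a = (((List.range a.length).map (runLen a)).sum : Int) := by
  unfold solution
  cases hn : a.length with
  | zero =>
    rw [PySem.List.pyRange_one_eq_nil (by norm_num)]
    simp
  | succ k =>
    rw [show ((k + 1 : Nat) : Int) - 1 = (k : Int) by push_cast; ring]
    have hfold := solution_foldA a k (by omega) 0
    rw [hn] at hfold
    rw [hfold]
    rw [List.range_succ, List.map_append, List.sum_append]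
    have hrk : runLen a k = 0 := by
      simp [runLen, List.drop_eq_nil_of_le (by omega : a.length ≤ k + 1)]
    simp [hrk]

theorem solution_alt_eq (a : List Int) :
    (loopB a a.length a.length).2 = (((List.range a.length).map (runLen a)).sum : Int) := by
  obtain ⟨-, -, hsum⟩ := loopB_invariant a a.length le_rfl
  rw [hsum, Nat.sub_self, ← List.range_eq_range']

-- ===== VERDICT (by name: the statement is the Claim_ definition above) =====
theorem solution_spec : Claim_equal_solution := by
  intro kyul _
  unfold Spec_solution solution_alt
  rw [solution_eq, solution_alt_eq]
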